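-- pv_equiv track=rewrite | github.com/Albert-learner/Algorithm | Programmers/LEVEL1/RoughlyMakeKeyboard.py | solution
-- ===== SOURCE A (Python) =====
-- def solution(keymap, targets):
--     answer = [0] * len(targets)
--
--     minimum_keymap_dict = {}
--     keymap_target_idx_lst = sorted([(keym_chr, keym_idx) for keym in keymap for keym_idx, keym_chr in enumerate(keym, 1)],
--                                    key = lambda x : x[0])
--
--     for keym_chr, keym_idx in keymap_target_idx_lst:
--         if keym_chr not in minimum_keymap_dict:
--             minimum_keymap_dict[keym_chr] = keym_idx
--         else:
--             min_key_value = minimum_keymap_dict[keym_chr]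
--             if keym_idx < min_key_value:
--                 minimum_keymap_dict[keym_chr] = keym_idx
--
--     for target_idx in range(len(targets)):
--         target = targets[target_idx]
--         for target_chr in target:
--             if target_chr in minimum_keymap_dict:
--                 answer[target_idx] += minimum_keymap_dict[target_chr]
--             else:
--                 answer[target_idx] = -1
--                 break
--
--     return answer
-- ===== SOURCE B (Python) =====
-- def solution(keymap, targets):
--     def cost(target):
--         total = 0
--         for ch in target:
--             positions = [k.index(ch) + 1 for k in keymap if ch in k]
--             if not positions:
--                 return -1
--             total += min(positions)
--         return total
--     return [cost(t) for t in targets]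
-- ===== Notes on version B (the rewrite author's own statement) =====
-- stated objective: simpler
-- what changed: Drops A's sort-all-positions-then-fold-a-min-dict preprocessing; B directly rescans the keymap strings for each target character, taking min(k.index(ch)+1) over the keymaps containing it, returning -1 for the target when none does.
import Mathlib
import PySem

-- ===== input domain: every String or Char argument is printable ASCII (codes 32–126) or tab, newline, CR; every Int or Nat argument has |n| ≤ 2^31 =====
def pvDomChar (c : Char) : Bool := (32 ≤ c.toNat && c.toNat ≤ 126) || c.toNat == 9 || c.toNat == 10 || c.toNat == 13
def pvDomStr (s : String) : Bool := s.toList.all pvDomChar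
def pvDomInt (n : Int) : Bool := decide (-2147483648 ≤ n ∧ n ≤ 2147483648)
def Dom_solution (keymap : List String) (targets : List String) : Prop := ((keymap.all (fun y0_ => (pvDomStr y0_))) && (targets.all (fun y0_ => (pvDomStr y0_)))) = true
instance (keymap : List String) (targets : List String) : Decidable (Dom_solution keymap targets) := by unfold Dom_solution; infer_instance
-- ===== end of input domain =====

-- B drops A's sorted-positions + min-dict preprocessing and rescans the keymaps per target character (simpler; not faster).


-- ===== PORT A =====
-- inner 'for target_chr in target: … else: answer[idx] = -1; break' as structural recursion over the chars
def solutionTargetLoop (d : PySem.Dict Char Int) : List Char → Int → Int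
  | [], acc => acc
  | c :: cs, acc =>
    match d.get? c with
    | some v => solutionTargetLoop d cs (acc + v)
    | none => -1

def solution (keymap : List String) (targets : List String) : List Int :=
  let keymap_target_idx_lst :=
    PySem.List.sorted
      (keymap.flatMap (fun keym =>
        (PySem.List.enumerate keym.toList 1).map (fun p => (p.2, p.1))))
      (fun x => x.1) false
  let minimum_keymap_dict :=
    keymap_target_idx_lst.foldl (fun d p =>
      match d.get? p.1 with
      | none => d.insert p.1 p.2
      | some m => if p.2 < m then d.insert p.1 p.2 else d) PySem.Dict.empty
  targets.map (fun t => solutionTargetLoop minimum_keymap_dict t.toList 0)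

-- ===== PORT B =====
-- '[k.index(ch) + 1 for k in keymap if ch in k]'
def solutionAltPositions (keymap : List String) (c : Char) : List Int :=
  keymap.filterMap (fun k => (PySem.List.index? k.toList c).map (fun i => (i : Int) + 1))

-- 'for ch in target: … if not positions: return -1; total += min(positions)'
def solutionAltCost (keymap : List String) : List Char → Int → Int
  | [], total => total
  | c :: cs, total =>
    match PySem.List.min? (solutionAltPositions keymap c) (fun x => x) with
    | none => -1
    | some m => solutionAltCost keymap cs (total + m)

def solution_alt (keymap : List String) (targets : List String) : List Int :=
  targets.map (fun t => solutionAltCost keymap t.toList 0)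

-- ===== PRECONDITION & SPEC =====
def Spec_solution (keymap : List String) (targets : List String) (out : List Int) : Prop := out = solution_alt keymap targets
instance (keymap : List String) (targets : List String) (out : List Int) : Decidable (Spec_solution keymap targets out) := by unfold Spec_solution; infer_instance

-- ===== CLAIM (what is proved, stated in full; the proofs are below) =====
def Claim_equal_solution : Prop := ∀ (keymap : List String) (targets : List String), Dom_solution keymap targets → Spec_solution keymap targets (solution keymap targets)

-- ===== LEMMAS AND PROOFS =====

-- the 'min-update' step of A's dict fold, as an operation on the current optional minimum
def minUpd (o : Option Int) (i : Int) : Option Int :=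
  match o with
  | none => some i
  | some m => if i < m then some i else some m

theorem minUpd_eq_min (m i : Int) : minUpd (some m) i = some (min m i) := by
  simp only [minUpd]
  split_ifs <;> congr 1 <;> omega

theorem minUpd_right_comm (o : Option Int) (a b : Int) :
    minUpd (minUpd o a) b = minUpd (minUpd o b) a := by
  cases o with
  | none => simp only [minUpd]; split_ifs <;> congr 1 <;> omega
  | some m => simp only [minUpd_eq_min]; congr 1; omega

theorem minUpd_le (o : Option Int) (i m : Int) (h : minUpd o i = some m) : m ≤ i := by
  cases o with
  | none => simp [minUpd] at h; omega
  | some m' => rw [minUpd_eq_min] at h; simp at h; omega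

-- A's dict fold looked up at c only sees the pairs whose key is c
theorem get?_dictFold (ps : List (Char × Int)) (d : PySem.Dict Char Int) (c : Char) :
    (ps.foldl (fun d p =>
      match d.get? p.1 with
      | none => d.insert p.1 p.2
      | some m => if p.2 < m then d.insert p.1 p.2 else d) d).get? c
    = (ps.filterMap (fun p => if p.1 = c then some p.2 else none)).foldl minUpd (d.get? c) := by
  induction ps generalizing d with
  | nil => rfl
  | cons p ps ih =>
    simp only [List.foldl_cons]
    by_cases hc : p.1 = c
    · subst hc
      cases hg : d.get? p.1 with
      | none =>
        simp [ih, hg, PySem.Dict.get?_insert_self, minUpd]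
      | some m =>
        by_cases hlt : p.2 < m
        · simp [hlt, ih, PySem.Dict.get?_insert_self, minUpd]
        · simp [hlt, ih, hg, minUpd]
    · have hrw : ∀ (d' : PySem.Dict Char Int),
          (d'.insert p.1 p.2).get? c = d'.get? c :=
        fun d' => PySem.Dict.get?_insert_of_ne d' p.2 (fun h => hc h.symm)
      cases hg : d.get? p.1 with
      | none => simp [ih, hrw, hc]
      | some m => by_cases hlt : p.2 < m <;> simp [hlt, ih, hrw, hc]

-- positions of c in one keymap string (what A's comprehension contributes for key c)
theorem filterMap_enum_occ (km : List Char) (c : Char) (s : Int) (o : Option Int) :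
    (((PySem.List.enumerate km s).map (fun p => (p.2, p.1))).filterMap
        (fun p => if p.1 = c then some p.2 else none)).foldl minUpd o
    = match PySem.List.index? km c with
      | none => o
      | some i => minUpd o ((i : Int) + s) := by
  induction km generalizing s o with
  | nil => simp [PySem.List.enumerate_nil]
  | cons x xs ih =>
    rw [PySem.List.enumerate_cons]
    simp only [List.map_cons]
    by_cases hx : x = c
    · subst hx
      rw [PySem.List.index?_cons_self,
        List.filterMap_cons_some (b := s) (by simp), List.foldl_cons, ih]
      have hz : ((0 : Nat) : Int) + s = s := by simp
      cases hi : PySem.List.index? xs x with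
      | none =>
        show minUpd o s = minUpd o (((0 : Nat) : Int) + s)
        rw [hz]
      | some i =>
        show minUpd (minUpd o s) ((i : Int) + (s + 1)) = minUpd o (((0 : Nat) : Int) + s)
        rw [hz]
        obtain ⟨m, hm⟩ : ∃ m, minUpd o s = some m := by
          cases o with
          | none => exact ⟨s, rfl⟩
          | some m' => exact ⟨min m' s, minUpd_eq_min m' s⟩
        rw [hm, minUpd_eq_min]
        have hms : m ≤ s := minUpd_le o s m hm
        have h0 : (0:Int) ≤ i := Int.natCast_nonneg i
        congr 1; omega
    · rw [PySem.List.index?_cons_of_ne _ hx,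
        List.filterMap_cons_none (by simp [hx]), ih]
      cases hi : PySem.List.index? xs c with
      | none => rfl
      | some i =>
        show minUpd o ((i : Int) + (s + 1)) = minUpd o (((i + 1 : Nat) : Int) + s)
        congr 1
        push_cast
        ring

-- fuse B's filterMap + min? into the same per-keymap fold
theorem foldl_minUpd_positions (keymap : List String) (c : Char) (o : Option Int) :
    (solutionAltPositions keymap c).foldl minUpd o
    = keymap.foldl (fun o k =>
        match PySem.List.index? k.toList c with
        | none => o
        | some i => minUpd o ((i : Int) + 1)) o := by
  induction keymap generalizing o with
  | nil => rfl
  | cons k ks ih =>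
    simp only [solutionAltPositions] at ih ⊢
    cases hi : PySem.List.index? k.toList c with
    | none =>
      rw [List.filterMap_cons_none (by rw [hi]; rfl), List.foldl_cons, hi, ih]
    | some i =>
      rw [List.filterMap_cons_some (b := (i : Int) + 1) (by rw [hi]; rfl),
        List.foldl_cons, List.foldl_cons, hi, ih]

theorem foldl_minUpd_eq_min? (l : List Int) :
    l.foldl minUpd none = PySem.List.min? l (fun x => x) := by
  cases l with
  | nil => rfl
  | cons v vs =>
    rw [PySem.List.min?_id_cons]
    simp only [List.foldl_cons, minUpd]
    induction vs generalizing v with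
    | nil => rfl
    | cons w ws ih => simp only [List.foldl_cons, minUpd_eq_min]; exact ih (min v w)

-- one keymap string at a time: A's flattened occurrence pairs fold to B's per-keymap first-index fold
theorem flatMap_fold_eq (keymap : List String) (c : Char) (o : Option Int) :
    ((keymap.flatMap (fun keym =>
        (PySem.List.enumerate keym.toList 1).map (fun p => (p.2, p.1)))).filterMap
      (fun p => if p.1 = c then some p.2 else none)).foldl minUpd o
    = keymap.foldl (fun o k =>
        match PySem.List.index? k.toList c with
        | none => o
        | some i => minUpd o ((i : Int) + 1)) o := by
  induction keymap generalizing o with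
  | nil => rfl
  | cons k ks ih =>
    rw [List.flatMap_cons, List.filterMap_append, List.foldl_append, List.foldl_cons,
      filterMap_enum_occ k.toList c 1 o]
    cases hi : PySem.List.index? k.toList c with
    | none => exact ih o
    | some i => exact ih _

-- the dict A builds agrees, as a lookup table, with B's rescan minimum
theorem dict_lookup_eq (keymap : List String) (c : Char) :
    ((PySem.List.sorted
      (keymap.flatMap (fun keym =>
        (PySem.List.enumerate keym.toList 1).map (fun p => (p.2, p.1))))
      (fun x => x.1) false).foldl (fun d p =>
      match d.get? p.1 with
      | none => d.insert p.1 p.2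
      | some m => if p.2 < m then d.insert p.1 p.2 else d) PySem.Dict.empty).get? c
    = PySem.List.min? (solutionAltPositions keymap c) (fun x => x) := by
  rw [get?_dictFold, PySem.Dict.get?_empty]
  have hperm2 := ((PySem.List.sorted_perm
      (keymap.flatMap (fun keym =>
        (PySem.List.enumerate keym.toList 1).map (fun p => (p.2, p.1))))
      (fun x => x.1) false).filterMap
      (fun p : Char × Int => if p.1 = c then some p.2 else none))
  letI : RightCommutative minUpd := ⟨minUpd_right_comm⟩
  rw [hperm2.foldl_eq none, flatMap_fold_eq, ← foldl_minUpd_positions,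
    foldl_minUpd_eq_min?]

theorem target_loop_eq (keymap : List String) (d : PySem.Dict Char Int)
    (h : ∀ c, d.get? c = PySem.List.min? (solutionAltPositions keymap c) (fun x => x))
    (cs : List Char) (acc : Int) :
    solutionTargetLoop d cs acc = solutionAltCost keymap cs acc := by
  induction cs generalizing acc with
  | nil => rfl
  | cons c cs ih =>
    simp only [solutionTargetLoop, solutionAltCost, h c]
    cases PySem.List.min? (solutionAltPositions keymap c) (fun x => x) with
    | none => rfl
    | some m => exact ih (acc + m)

-- ===== VERDICT (by name: the statement is the Claim_ definition above) =====
theorem solution_spec : Claim_equal_solution := by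
  intro keymap targets _
  unfold Spec_solution solution solution_alt
  simp only []
  apply List.map_congr_left
  intro t _
  exact target_loop_eq keymap _ (fun c => dict_lookup_eq keymap c) t.toList 0
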